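-- pv_equiv track=rewrite | github.com/benquick123/code-profiling | code/batch-1/vse-naloge-brez-testov/DN7-M-66.py | najvec_sosedov
-- ===== SOURCE A (Python) =====
-- def vsa_polja(s, v):
--     """
--     Generiraj vse koordinate (x, y) za polje s podano širino in višino
--     Args:
--         s (int): širina
--         v (int): višina
--
--     Returns:
--         generator parov polj
--     """
--     return ((x, y) for x in range(s) for y in range(v))
--
-- def sosedov(x, y, mine):
--     """
--     Vrni število sosedov polja s koordinatami `(x, y)` na katerih je mina.
--     Polje samo ne šteje.
--
--     Args:
--         x (int): koordinata x
--         y (int): koordinata y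
--         mine (set of tuple of int): koordinate min
--
--     Returns:
--         int: število sosedov
--     """
--
--     stevec = 0
--     for mina in mine:
--         if -1 <= x-mina[0] <= 1 and -1 <= y-mina[1] <=1 and (x,y) != mina:
--             stevec+=1
--     return stevec
--
-- def najvec_sosedov(mine, s, v):
--     """
--     Vrni koordinati polja z največ sosednjih min
--
--     Args:
--         mine (set of (int, int)): koordinate min
--         s (int): širina polja
--         v (int): višina polja
--
--     Returns:
--         tuple of int: koordinati polja
--
--     """
--
--     maks = 0
--     k1 = k2 = 0
--     for (x, y) in vsa_polja(s, v):
--         if sosedov(x, y, mine)>maks: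
--             maks = sosedov(x,y, mine)
--             k1 = x
--             k2 = y
--     return k1, k2
-- ===== SOURCE B (Python) =====
-- _OFFSETS = [(-1, -1), (-1, 0), (-1, 1), (0, -1), (0, 1), (1, -1), (1, 0), (1, 1)]
--
-- def najvec_sosedov(mine, s, v):
--     # Scatter: each mine contributes +1 to each of its 8 neighbor cells.
--     cnt = {}
--     for (mx, my) in mine:
--         for (dx, dy) in _OFFSETS:
--             key = (mx + dx, my + dy)
--             cnt[key] = cnt.get(key, 0) + 1
--     best = 0
--     k1 = k2 = 0
--     for x in range(s):
--         for y in range(v):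
--             c = cnt.get((x, y), 0)
--             if c > best:
--                 best, k1, k2 = c, x, y
--     return (k1, k2)
-- ===== Notes on version B (the rewrite author's own statement) =====
-- stated objective: faster
-- what changed: Instead of re-scanning the whole mine list for every grid cell, B scatters +1 from each mine to its 8 neighbor cells into a dict once, then scans the cells in the same order with O(1) lookups.
import Mathlib
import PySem

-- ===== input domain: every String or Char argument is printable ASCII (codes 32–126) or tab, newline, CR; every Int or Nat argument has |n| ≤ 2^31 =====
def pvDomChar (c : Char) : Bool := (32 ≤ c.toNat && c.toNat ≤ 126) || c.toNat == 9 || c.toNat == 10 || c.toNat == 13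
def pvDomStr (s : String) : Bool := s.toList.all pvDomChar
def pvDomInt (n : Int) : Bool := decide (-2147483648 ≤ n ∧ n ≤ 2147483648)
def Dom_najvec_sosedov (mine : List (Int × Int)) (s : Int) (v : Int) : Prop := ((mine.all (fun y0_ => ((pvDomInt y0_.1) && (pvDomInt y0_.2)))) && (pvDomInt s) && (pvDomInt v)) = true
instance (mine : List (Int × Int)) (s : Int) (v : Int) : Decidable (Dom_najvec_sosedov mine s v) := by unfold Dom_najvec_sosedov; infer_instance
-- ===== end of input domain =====

-- B replaces A's per-cell rescan of the mine list by a one-pass scatter of +1 to each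
-- mine's 8 neighbors into a dict, then a scan of the cells in the same order (faster: asymptotic).


-- ===== PORT A =====
def vsa_polja (s v : Int) : List (Int × Int) :=
  (PySem.List.pyRange 0 s 1).flatMap (fun x => (PySem.List.pyRange 0 v 1).map (fun y => (x, y)))

def sosedov (x y : Int) (mine : List (Int × Int)) : Int :=
  mine.foldl (fun stevec mina =>
    if -1 ≤ x - mina.1 ∧ x - mina.1 ≤ 1 ∧ -1 ≤ y - mina.2 ∧ y - mina.2 ≤ 1 ∧ (x, y) ≠ mina
    then stevec + 1 else stevec) 0

def najvec_sosedov (mine : List (Int × Int)) (s : Int) (v : Int) : Int × Int :=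
  let r := (vsa_polja s v).foldl (fun (st : Int × Int × Int) p =>
    if sosedov p.1 p.2 mine > st.1 then (sosedov p.1 p.2 mine, p.1, p.2) else st) (0, 0, 0)
  (r.2.1, r.2.2)

-- ===== PORT B =====
def pvOffsets : List (Int × Int) :=
  [(-1, -1), (-1, 0), (-1, 1), (0, -1), (0, 1), (1, -1), (1, 0), (1, 1)]

-- cnt: for (mx,my) in mine: for (dx,dy) in _OFFSETS: cnt[key] = cnt.get(key,0)+1
def pvScatter (mine : List (Int × Int)) : PySem.Dict (Int × Int) Int :=
  mine.foldl (fun cnt m =>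
    pvOffsets.foldl (fun cnt d =>
      let key := (m.1 + d.1, m.2 + d.2)
      cnt.insert key (cnt.getD key 0 + 1)) cnt) PySem.Dict.empty

def najvec_sosedov_alt (mine : List (Int × Int)) (s : Int) (v : Int) : Int × Int :=
  let cnt := pvScatter mine
  let r := (PySem.List.pyRange 0 s 1).foldl (fun (st : Int × Int × Int) x =>
    (PySem.List.pyRange 0 v 1).foldl (fun (st : Int × Int × Int) y =>
      let c := cnt.getD (x, y) 0
      if c > st.1 then (c, x, y) else st) st) (0, 0, 0)
  (r.2.1, r.2.2)

-- ===== PRECONDITION & SPEC =====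
def Spec_najvec_sosedov (mine : List (Int × Int)) (s : Int) (v : Int) (out : Int × Int) : Prop := out = najvec_sosedov_alt mine s v
instance (mine : List (Int × Int)) (s : Int) (v : Int) (out : Int × Int) : Decidable (Spec_najvec_sosedov mine s v out) := by unfold Spec_najvec_sosedov; infer_instance

-- ===== CLAIM (what is proved, stated in full; the proofs are below) =====
def Claim_equal_najvec_sosedov : Prop := ∀ (mine : List (Int × Int)) (s : Int) (v : Int), Dom_najvec_sosedov mine s v → Spec_najvec_sosedov mine s v (najvec_sosedov mine s v)

-- ===== LEMMAS AND PROOFS =====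

-- the flat list of all neighbor cells contributed by the mines
def pvNeigh (mine : List (Int × Int)) : List (Int × Int) :=
  mine.flatMap (fun m => pvOffsets.map (fun d => (m.1 + d.1, m.2 + d.2)))

lemma pvScatter_eq_flat (mine : List (Int × Int)) :
    pvScatter mine =
      (pvNeigh mine).foldl (fun cnt key => cnt.insert key (cnt.getD key 0 + 1)) PySem.Dict.empty := by
  rw [pvNeigh, List.foldl_flatMap]
  unfold pvScatter
  congr 1

lemma pvScatter_getD (mine : List (Int × Int)) (c : Int × Int) :
    (pvScatter mine).getD c 0 = ((pvNeigh mine).count c : Int) := by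
  rw [pvScatter_eq_flat, PySem.Dict.getD_foldl_insert_add_one, PySem.Dict.getD_empty, zero_add]

set_option maxHeartbeats 1000000 in
lemma pvNeigh_count_per_mine (m : Int × Int) (x y : Int) :
    ((pvOffsets.map (fun d => (m.1 + d.1, m.2 + d.2))).count (x, y) : Int) =
      (if -1 ≤ x - m.1 ∧ x - m.1 ≤ 1 ∧ -1 ≤ y - m.2 ∧ y - m.2 ≤ 1 ∧ (x, y) ≠ m then 1 else 0) := by
  obtain ⟨mx, my⟩ := m
  simp only [pvOffsets, List.map_cons, List.map_nil, List.count_cons, List.count_nil,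
    Prod.ext_iff, ne_eq, beq_iff_eq]
  split_ifs <;> simp_all <;> omega

set_option maxHeartbeats 1000000 in
lemma pvNeigh_count (mine : List (Int × Int)) (x y : Int) :
    ((pvNeigh mine).count (x, y) : Int) =
      (mine.countP (fun m => decide (-1 ≤ x - m.1 ∧ x - m.1 ≤ 1 ∧ -1 ≤ y - m.2 ∧ y - m.2 ≤ 1 ∧ (x, y) ≠ m)) : Int) := by
  induction mine with
  | nil => simp [pvNeigh]
  | cons m t ih =>
    rw [pvNeigh, List.flatMap_cons, List.count_append, List.countP_cons]
    push_cast
    rw [show (t.flatMap (fun m => pvOffsets.map (fun d => (m.1 + d.1, m.2 + d.2)))) = pvNeigh t from rfl,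
      ih, pvNeigh_count_per_mine]
    split_ifs <;> simp_all <;> omega

lemma sosedov_eq_getD (mine : List (Int × Int)) (x y : Int) :
    sosedov x y mine = (pvScatter mine).getD (x, y) 0 := by
  rw [pvScatter_getD, sosedov, PySem.List.foldl_ite_add_one, zero_add, pvNeigh_count]

theorem najvec_sosedov_eq_alt (mine : List (Int × Int)) (s v : Int) :
    najvec_sosedov mine s v = najvec_sosedov_alt mine s v := by
  have hstep : ∀ (x : Int),
      (fun (st : Int × Int × Int) (y : Int) =>
        if sosedov x y mine > st.1 then (sosedov x y mine, x, y) else st)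
      = (fun (st : Int × Int × Int) (y : Int) =>
        if (pvScatter mine).getD (x, y) 0 > st.1 then ((pvScatter mine).getD (x, y) 0, x, y) else st) := by
    intro x; funext st y; rw [sosedov_eq_getD]
  simp only [najvec_sosedov, najvec_sosedov_alt, vsa_polja, List.foldl_flatMap, List.foldl_map, hstep]

-- ===== VERDICT (by name: the statement is the Claim_ definition above) =====
theorem najvec_sosedov_spec : Claim_equal_najvec_sosedov := by
  intro mine s v _
  unfold Spec_najvec_sosedov
  exact najvec_sosedov_eq_alt mine s v
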